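-- pv_equiv track=rewrite | github.com/cumulus308/coding_practice | 프로그래머스/0/120886. A로 B 만들기/A로 B 만들기.py | solution
-- ===== SOURCE A (Python) =====
-- def solution(before, after):
--     list_after = list(after)
--     while list_after:
--         for i in before:
--             if i in list_after:
--                 list_after.remove(i)
--             else:
--                 return 0
--         else:
--             return 1
-- ===== SOURCE B (Python) =====
-- def solution(before, after):
--     a = sorted(after)
--     n = len(a)
--     j = 0
--     for x in sorted(before):
--         while j < n and a[j] < x:
--             j += 1
--         if j < n and a[j] == x:
--             j += 1
--         else:
--             return 0
--     return 1
-- ===== Notes on version B (the rewrite author's own statement) =====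
-- stated objective: faster
-- what changed: Replaces A's per-character membership test plus remove() on a shrinking copy of after (quadratic scanning) with sorting both strings once and a single two-pointer merge pass over the sorted lists.
-- outside the precondition, e.g. on solution('', ''): A returns None, B returns 1; on solution('a', ''): A returns None, B returns 0
import Mathlib
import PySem

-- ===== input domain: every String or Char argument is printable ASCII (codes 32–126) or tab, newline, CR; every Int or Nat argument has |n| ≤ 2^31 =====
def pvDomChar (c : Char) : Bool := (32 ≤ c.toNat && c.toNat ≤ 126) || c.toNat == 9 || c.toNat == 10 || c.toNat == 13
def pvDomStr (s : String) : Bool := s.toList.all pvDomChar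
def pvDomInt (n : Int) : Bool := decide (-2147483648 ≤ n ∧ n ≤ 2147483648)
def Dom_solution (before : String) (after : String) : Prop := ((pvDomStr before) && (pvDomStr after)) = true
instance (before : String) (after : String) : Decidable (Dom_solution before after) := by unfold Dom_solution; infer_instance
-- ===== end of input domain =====

-- B replaces A's repeated membership-test-and-remove scanning of list(after) by sorting both
-- strings once and consuming them with a single two-pointer merge pass (objective: faster; a timing run measured it).

-- ===== PORT A =====
-- the `for i in before` loop body: membership test, remove first occurrence, or return 0;
-- the `for`-`else` returns 1 when the loop completes
def pyForA : List Char → List Char → Int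
  | [], _ => 1
  | i :: rest, la =>
    if i ∈ la then
      match PySem.List.remove? la i with
      | some la' => pyForA rest la'
      | none => 0          -- unreachable: membership was just tested
    else 0

def solution (before : String) (after : String) : Int :=
  let list_after := after.toList
  -- `while list_after:` — when list_after is empty the Python falls off and returns None
  -- (excluded by Pre_solution; the value here is arbitrary); otherwise the body returns
  -- on its first iteration.
  if list_after = [] then 0 else pyForA before.toList list_after

-- ===== PORT B =====
-- the two-pointer merge walk over the two sorted lists (Source B's for/while over index j)
def tpB : List Char → List Char → Int
  | [], _ => 1
  | _ :: _, [] => 0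
  | x :: bs, y :: as_ =>
    if y < x then tpB (x :: bs) as_          -- while j < n and a[j] < x: j += 1
    else if y = x then tpB bs as_            -- consume the match
    else 0
termination_by b a => (b.length, a.length)

def solution_alt (before : String) (after : String) : Int :=
  tpB (PySem.List.sorted before.toList (fun c => c) false)
      (PySem.List.sorted after.toList (fun c => c) false)

-- ===== PRECONDITION & SPEC =====
-- Pre_ excludes after = "": there Python A's `while` never runs and A returns None, not an int.
def Pre_solution (before : String) (after : String) : Prop := after ≠ ""
instance (before : String) (after : String) : Decidable (Pre_solution before after) := by
  unfold Pre_solution; infer_instance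
def pvWitness_solution : String × String := ("ab", "cab")

def Spec_solution (before : String) (after : String) (out : Int) : Prop := out = solution_alt before after
instance (before : String) (after : String) (out : Int) : Decidable (Spec_solution before after out) := by unfold Spec_solution; infer_instance

-- ===== CLAIM (what is proved, stated in full; the proofs are below) =====
def Claim_equal_solution : Prop := ∀ (before : String) (after : String), Dom_solution before after → Pre_solution before after → Spec_solution before after (solution before after)

-- ===== LEMMAS AND PROOFS =====

-- A's pass computes the sub-multiset indicator.
theorem pyForA_eq (b : List Char) : ∀ a : List Char,
    pyForA b a = if List.Subperm b a then 1 else 0 := by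
  induction b with
  | nil => intro a; simp [pyForA]
  | cons i rest ih =>
    intro a
    by_cases hm : i ∈ a
    · rw [pyForA, if_pos hm, PySem.List.remove?_eq_some_erase a i hm]
      show pyForA rest (a.erase i) = if List.Subperm (i :: rest) a then 1 else 0
      rw [ih]
      have hiff : List.Subperm (i :: rest) a ↔ List.Subperm rest (a.erase i) := by
        rw [(List.perm_cons_erase hm).subperm_left, List.subperm_cons]
      by_cases h : List.Subperm rest (a.erase i)
      · rw [if_pos h, if_pos (hiff.mpr h)]
      · rw [if_neg h, if_neg (fun hc => h (hiff.mp hc))]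
    · rw [pyForA, if_neg hm, if_neg]
      intro hc
      exact hm (hc.subset (List.mem_cons_self ..))

-- B's merge walk computes the same indicator on sorted inputs.
theorem tpB_eq (n : Nat) : ∀ (b a : List Char), b.length + a.length ≤ n →
    b.Pairwise (· ≤ ·) → a.Pairwise (· ≤ ·) →
    tpB b a = if List.Subperm b a then 1 else 0 := by
  induction n with
  | zero =>
    intro b a hn _ _
    have hb : b = [] := by cases b <;> simp_all
    subst hb; simp [tpB]
  | succ n ih =>
    intro b a hn hb ha
    match b, a with
    | [], a => simp [tpB]
    | x :: bs, [] => simp [tpB]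
    | x :: bs, y :: as_ =>
      rw [tpB]
      rcases List.pairwise_cons.mp hb with ⟨hxbs, hbs⟩
      rcases List.pairwise_cons.mp ha with ⟨hyas, has⟩
      by_cases hlt : y < x
      · rw [if_pos hlt, ih (x :: bs) as_ (by simp at hn ⊢; omega) hb has]
        have hiff : List.Subperm (x :: bs) (y :: as_) ↔ List.Subperm (x :: bs) as_ := by
          constructor
          · intro h
            rw [List.subperm_ext_iff] at h ⊢
            intro z hz
            have hxz : x ≤ z := by
              rcases List.mem_cons.mp hz with rfl | hz'
              · exact le_refl z
              · exact hxbs z hz'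
            have hzy : y ≠ z := fun he => absurd (he ▸ hxz) (not_le.mpr hlt)
            have := h z hz
            rwa [List.count_cons_of_ne hzy] at this
          · intro h
            exact h.trans (List.sublist_cons_self y as_).subperm
        by_cases h : List.Subperm (x :: bs) as_
        · rw [if_pos h, if_pos (hiff.mpr h)]
        · rw [if_neg h, if_neg (fun hc => h (hiff.mp hc))]
      · by_cases heq : y = x
        · subst heq
          rw [if_neg hlt, if_pos rfl,
              ih bs as_ (by simp at hn ⊢; omega) hbs has]
          by_cases h : List.Subperm bs as_
          · rw [if_pos h, if_pos ((List.subperm_cons y).mpr h)]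
          · rw [if_neg h, if_neg (fun hc => h ((List.subperm_cons y).mp hc))]
        · rw [if_neg hlt, if_neg heq, if_neg]
          intro hc
          have hx : x ∈ y :: as_ := hc.subset (List.mem_cons_self ..)
          rcases List.mem_cons.mp hx with rfl | hx'
          · exact heq rfl
          · exact hlt (lt_of_le_of_ne (hyas x hx') heq)

theorem solution_alt_eq (before after : String) :
    solution_alt before after =
      if List.Subperm before.toList after.toList then 1 else 0 := by
  unfold solution_alt
  rw [tpB_eq ((PySem.List.sorted before.toList (fun c => c) false).length
        + (PySem.List.sorted after.toList (fun c => c) false).length)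
      _ _ (le_refl _)
      (PySem.List.sorted_pairwise before.toList (fun c => c))
      (PySem.List.sorted_pairwise after.toList (fun c => c))]
  have hiff : List.Subperm (PySem.List.sorted before.toList (fun c => c) false)
        (PySem.List.sorted after.toList (fun c => c) false)
      ↔ List.Subperm before.toList after.toList :=
    ((PySem.List.sorted_perm before.toList (fun c => c) false).subperm_right).trans
      ((PySem.List.sorted_perm after.toList (fun c => c) false).subperm_left)
  by_cases h : List.Subperm before.toList after.toList
  · rw [if_pos (hiff.mpr h), if_pos h]
  · rw [if_neg (fun hc => h (hiff.mp hc)), if_neg h]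

-- ===== VERDICT (by name: the statement is the Claim_ definition above) =====
theorem solution_spec : Claim_equal_solution := by
  intro before after _ hpre
  unfold Spec_solution solution
  have hne : after.toList ≠ [] := fun h => hpre (by
    have := congrArg String.ofList h
    simpa using this)
  rw [if_neg hne, pyForA_eq, solution_alt_eq]
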